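-- pv_equiv track=rewrite | github.com/afreedpashar/Python-Progams | interview_problems/equalization.py | equalization
-- ===== SOURCE A (Python) =====
-- def equalization(n,m,s,t):
--     count =0
--     s1=[]
--     for ch in s:
--         s1.append(ch)
--     for i in range(n):
--         char=s1.pop(i)
--         j = "".join(s1)
--         for word in t:
--             if j==word:
--                 count+=1
--         s1.insert(i,char)
--     return count
-- ===== SOURCE B (Python) =====
-- def _lcp(x, y):
--     # length of the longest common prefix of two sequences
--     p = 0
--     for a, b in zip(x, y):
--         if a != b:
--             break
--         p += 1
--     return p
--
-- def equalization(n, m, s, t):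
--     # For each word w, the deletion positions i with s[:i]+s[i+1:] == w form a
--     # contiguous interval [len(s)-1-lcs, lcp]; count its overlap with [0, n).
--     L = len(s)
--     total = 0
--     for w in t:
--         if len(w) != L - 1:
--             continue
--         p = _lcp(s, w)
--         q = _lcp(s[::-1], w[::-1])
--         lo = max(0, L - 1 - q)
--         hi = min(p, n - 1)
--         total += max(0, hi - lo + 1)
--     return total
-- ===== Notes on version B (the rewrite author's own statement) =====
-- stated objective: faster
-- what changed: B never builds deletion strings of s: it scans t once and, per word, computes the longest common prefix and suffix with s, then counts the valid deletion positions as an interval intersection with [0, n).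
import Mathlib
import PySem

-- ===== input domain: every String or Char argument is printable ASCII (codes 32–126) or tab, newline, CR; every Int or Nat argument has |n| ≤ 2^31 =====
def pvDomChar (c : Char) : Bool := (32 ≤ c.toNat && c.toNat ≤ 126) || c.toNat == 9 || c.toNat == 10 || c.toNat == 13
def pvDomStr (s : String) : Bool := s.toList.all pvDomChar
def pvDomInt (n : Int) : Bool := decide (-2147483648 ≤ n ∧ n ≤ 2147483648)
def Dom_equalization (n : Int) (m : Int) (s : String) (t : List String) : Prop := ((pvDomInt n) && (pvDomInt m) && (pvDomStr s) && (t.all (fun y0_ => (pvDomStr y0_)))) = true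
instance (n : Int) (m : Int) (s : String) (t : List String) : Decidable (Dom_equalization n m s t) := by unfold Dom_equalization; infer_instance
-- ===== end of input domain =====

-- B scans t once: per word it computes the common prefix/suffix lengths with s and counts
-- the valid deletion positions as an interval, instead of A's building every deletion string
-- of s and rescanning all of t for each (faster; asymptotic).

-- ===== PORT A =====
def equalization (n : Int) (m : Int) (s : String) (t : List String) : Int :=
  -- count = 0; s1 = []; for ch in s: s1.append(ch)
  let s1 : List Char := s.toList.foldl (fun acc ch => acc ++ [ch]) []
  -- for i in range(n): char = s1.pop(i); j = "".join(s1); for word in t: …; s1.insert(i, char)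
  let r := (PySem.List.pyRange 0 n 1).foldl (fun st i =>
    match PySem.List.pop? st.2 i with
    | none => st  -- s1.pop(i) raises IndexError here (excluded by Pre_)
    | some (ch, rest) =>
      let j := String.ofList rest  -- "".join(s1)
      (t.foldl (fun c word => if j == word then c + 1 else c) st.1,
       PySem.List.insert rest i ch)) ((0 : Int), s1)
  r.1

-- ===== PORT B =====
-- _lcp: p = 0; for a, b in zip(x, y): if a != b: break; p += 1; return p
def pvLcp (x y : List Char) : Nat :=
  match x, y with
  | a :: as, b :: bs => if a = b then pvLcp as bs + 1 else 0
  | _, _ => 0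

def equalization_alt (n : Int) (m : Int) (s : String) (t : List String) : Int :=
  let L : Int := (s.toList.length : Int)   -- L = len(s)
  -- total = 0; for w in t: …
  t.foldl (fun total w =>
    if (w.toList.length : Int) ≠ L - 1 then total   -- continue
    else
      let p : Int := (pvLcp s.toList w.toList : Int)
      -- s[::-1] is reverse (PySem.Str.slice?_none_none_neg_one)
      let q : Int := (pvLcp s.toList.reverse w.toList.reverse : Int)
      let lo : Int := max 0 (L - 1 - q)
      let hi : Int := min p (n - 1)
      total + max 0 (hi - lo + 1)) 0

-- ===== PRECONDITION & SPEC =====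
-- Pre_ excludes exactly the inputs where A raises IndexError: n larger than len(s)
-- (s1.pop(i) at i = len(s)).
def Pre_equalization (n : Int) (m : Int) (s : String) (t : List String) : Prop :=
  n ≤ (s.toList.length : Int)
instance (n : Int) (m : Int) (s : String) (t : List String) : Decidable (Pre_equalization n m s t) := by unfold Pre_equalization; infer_instance
def pvWitness_equalization : Int × Int × String × List String := (2, 0, "abc", ["ab", "bc", "ac", "ab"])

def Spec_equalization (n : Int) (m : Int) (s : String) (t : List String) (out : Int) : Prop := out = equalization_alt n m s t
instance (n : Int) (m : Int) (s : String) (t : List String) (out : Int) : Decidable (Spec_equalization n m s t out) := by unfold Spec_equalization; infer_instance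

-- ===== CLAIM (what is proved, stated in full; the proofs are below) =====
def Claim_equal_equalization : Prop := ∀ (n : Int) (m : Int) (s : String) (t : List String), Dom_equalization n m s t → Pre_equalization n m s t → Spec_equalization n m s t (equalization n m s t)

-- ===== LEMMAS AND PROOFS =====

theorem foldl_append_singleton {α : Type} (l acc : List α) :
    l.foldl (fun a x => a ++ [x]) acc = acc ++ l := by
  induction l generalizing acc with
  | nil => simp
  | cons x xs ih => simp [List.foldl_cons, ih]

theorem fold_count (j : String) (t : List String) (acc : Int) :
    t.foldl (fun c word => if j == word then c + 1 else c) acc = acc + (t.count j : Int) := by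
  induction t generalizing acc with
  | nil => simp
  | cons w ws ih =>
    simp only [List.foldl_cons, List.count_cons, ih]
    by_cases h : j = w
    · simp [h, beq_iff_eq]
      push_cast
      ring
    · have h' : ¬ w = j := fun e => h e.symm
      simp [h, h', beq_iff_eq]

theorem insert_eraseIdx_restore {α : Type} (xs : List α) (a : Nat) (h : a < xs.length) :
    PySem.List.insert (xs.eraseIdx a) (a : Int) (xs[a]) = xs := by
  induction xs generalizing a with
  | nil => simp at h
  | cons x ys ih =>
    cases a with
    | zero => simp [PySem.List.insert_zero]
    | succ b =>
      have hb : b < ys.length := by simpa using h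
      have hle : (b + 1 : Nat) ≤ (x :: ys.eraseIdx b).length := by
        simp [List.length_eraseIdx_of_lt hb]; omega
      have := ih b hb
      rw [List.eraseIdx_cons_succ]
      rw [PySem.List.insert_natCast _ (b + 1) _ hle]
      rw [PySem.List.insert_natCast _ b _ (by simp [List.length_eraseIdx_of_lt hb]; omega)] at this
      simpa using congrArg (x :: ·) this

-- A's loop over range(a, a+k): each iteration pops index a+j, counts matches, and restores s1.
theorem loopA (t : List String) (s1 : List Char) :
    ∀ (k a : Nat), a + k ≤ s1.length → ∀ acc : Int,
      (PySem.List.pyRange (a : Int) ((a : Int) + (k : Int)) 1).foldl (fun st i =>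
        match PySem.List.pop? st.2 i with
        | none => st
        | some (ch, rest) =>
          let j := String.ofList rest
          (t.foldl (fun c word => if j == word then c + 1 else c) st.1,
           PySem.List.insert rest i ch)) (acc, s1)
      = (acc + ((List.range k).map (fun j => (t.count (String.ofList (s1.eraseIdx (a + j))) : Int))).sum, s1) := by
  intro k
  induction k with
  | zero =>
    intro a _ acc
    rw [PySem.List.pyRange_one_eq_nil (by omega)]
    simp
  | succ k ih =>
    intro a h acc
    have hlt : a < s1.length := by omega
    rw [PySem.List.pyRange_one_cons (by push_cast; omega)]
    rw [List.foldl_cons]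
    simp only [PySem.List.pop?_natCast s1 a hlt]
    rw [insert_eraseIdx_restore s1 a hlt]
    rw [fold_count]
    have : (a : Int) + 1 = ((a + 1 : Nat) : Int) := by push_cast; ring
    rw [this, show ((a : Int) + ((k + 1 : Nat) : Int)) = ((a + 1 : Nat) : Int) + (k : Int) by push_cast; ring]
    rw [ih (a + 1) (by omega)]
    have hsum : ((List.range (k + 1)).map (fun j => (t.count (String.ofList (s1.eraseIdx (a + j))) : Int))).sum
        = (t.count (String.ofList (s1.eraseIdx a)) : Int)
          + ((List.range k).map (fun j => (t.count (String.ofList (s1.eraseIdx (a + 1 + j))) : Int))).sum := by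
      rw [List.range_succ_eq_map]
      simp only [List.map_cons, List.sum_cons, List.map_map, Function.comp, Nat.add_zero]
      congr 1
      congr 1
      apply List.map_congr_left
      intro j _
      simp only [Function.comp_apply]
      rw [show a + j.succ = a + 1 + j by omega]
    rw [hsum, add_assoc]

-- 0/1-sum over a list is countP
theorem sum_ite_eq_countP {α : Type} (l : List α) (p : α → Prop) [DecidablePred p] :
    (l.map (fun x => if p x then (1 : Int) else 0)).sum = (l.countP (fun x => decide (p x)) : Int) := by
  induction l with
  | nil => simp
  | cons x xs ih =>
    simp only [List.map_cons, List.sum_cons, List.countP_cons, ih]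
    by_cases h : p x <;> simp [h] <;> push_cast <;> ring

-- exchange the two summations: Σ_j count t (g j) = Σ_{w∈t} #{j : g j = w}
theorem sum_count_swap (k : Nat) (g : Nat → String) (t : List String) :
    ((List.range k).map (fun j => (t.count (g j) : Int))).sum
      = (t.map (fun w => (((List.range k).countP (fun j => decide (g j = w))) : Int))).sum := by
  induction t with
  | nil => simp
  | cons w ws ih =>
    simp only [List.map_cons, List.sum_cons, List.count_cons]
    rw [← ih, ← sum_ite_eq_countP (List.range k) (fun j => g j = w)]
    rw [← List.sum_map_add]
    congr 1
    apply List.map_congr_left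
    intro j _
    by_cases h : g j = w
    · simp [h]
      ring
    · have h' : ¬ w = g j := fun e => h e.symm
      simp [h, h']

theorem countP_range_interval (k a b : Nat) :
    (List.range k).countP (fun j => decide (a ≤ j ∧ j ≤ b)) = min (b + 1) k - a := by
  induction k with
  | zero => simp
  | succ k ih =>
    rw [List.range_succ, List.countP_append, ih]
    by_cases h : a ≤ k ∧ k ≤ b
    · simp [List.countP_cons, h.1, h.2]
      omega
    · simp [List.countP_cons, h]
      omega

theorem lcp_le_iff (x y : List Char) (i : Nat) :
    i ≤ pvLcp x y ↔ i ≤ x.length ∧ i ≤ y.length ∧ x.take i = y.take i := by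
  induction x generalizing y i with
  | nil =>
    cases i <;> simp [pvLcp]
  | cons a as ih =>
    cases y with
    | nil =>
      cases i <;> simp [pvLcp]
    | cons b bs =>
      cases i with
      | zero => simp [pvLcp]
      | succ j =>
        by_cases hab : a = b
        · subst hab
          rw [show pvLcp (a :: as) (a :: bs) = pvLcp as bs + 1 from by simp [pvLcp]]
          simp only [List.take_succ_cons, List.length_cons]
          rw [Nat.succ_le_succ_iff, ih bs j]
          constructor
          · rintro ⟨h1, h2, h3⟩
            exact ⟨by omega, by omega, by rw [h3]⟩
          · rintro ⟨h1, h2, h3⟩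
            exact ⟨by omega, by omega, by injection h3⟩
        · rw [show pvLcp (a :: as) (b :: bs) = 0 from by simp [pvLcp, hab]]
          simp only [List.take_succ_cons, List.length_cons]
          constructor
          · omega
          · rintro ⟨-, -, h3⟩
            injection h3 with h3 _
            exact absurd h3 hab

theorem lcs_le_iff (x y : List Char) (i : Nat) :
    i ≤ pvLcp x.reverse y.reverse ↔
      i ≤ x.length ∧ i ≤ y.length ∧ x.drop (x.length - i) = y.drop (y.length - i) := by
  rw [lcp_le_iff]
  simp only [List.length_reverse, List.take_reverse, List.reverse_inj]

-- deletion characterization: for j < |s|, |w| = |s| - 1,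
-- s with position j deleted equals w iff j ≤ lcp and |s| - 1 - j ≤ lcs.
theorem erase_eq_iff (sl wl : List Char) (j : Nat) (hj : j < sl.length)
    (hw : wl.length + 1 = sl.length) :
    sl.eraseIdx j = wl ↔
      j ≤ pvLcp sl wl ∧ sl.length - 1 - j ≤ pvLcp sl.reverse wl.reverse := by
  rw [List.eraseIdx_eq_take_drop_succ]
  rw [lcp_le_iff, lcs_le_iff]
  constructor
  · intro h
    have htake : sl.take j = wl.take j := by
      have := congrArg (List.take j) h
      rwa [List.take_append_of_le_length (by simp; omega), List.take_take, min_self] at this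
    have hdrop : sl.drop (j + 1) = wl.drop j := by
      have := congrArg (List.drop j) h
      rw [List.drop_append_of_le_length (by simp; omega)] at this
      rwa [List.drop_eq_nil_of_le (by simp), List.nil_append] at this
    refine ⟨⟨by omega, by omega, htake⟩, by omega, by omega, ?_⟩
    rw [show sl.length - (sl.length - 1 - j) = j + 1 by omega,
        show wl.length - (sl.length - 1 - j) = j by omega]
    exact hdrop
  · rintro ⟨⟨-, -, htake⟩, -, -, hdrop⟩
    rw [show sl.length - (sl.length - 1 - j) = j + 1 by omega,
        show wl.length - (sl.length - 1 - j) = j by omega] at hdrop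
    rw [htake, hdrop, List.take_append_drop]

-- helper for the proofs: B's per-word contribution
def fB (n : Int) (sl : List Char) (w : String) : Int :=
  if (w.toList.length : Int) ≠ (sl.length : Int) - 1 then 0
  else max 0 (min ((pvLcp sl w.toList : Int)) (n - 1)
              - max 0 ((sl.length : Int) - 1 - (pvLcp sl.reverse w.toList.reverse : Int)) + 1)

theorem foldB_sum (n : Int) (sl : List Char) (t : List String) : ∀ acc : Int,
    t.foldl (fun total w =>
      if (w.toList.length : Int) ≠ (sl.length : Int) - 1 then total
      else total + max 0 (min ((pvLcp sl w.toList : Int)) (n - 1)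
                   - max 0 ((sl.length : Int) - 1 - (pvLcp sl.reverse w.toList.reverse : Int)) + 1)) acc
    = acc + (t.map (fB n sl)).sum := by
  induction t with
  | nil => intro acc; simp
  | cons w ws ih =>
    intro acc
    simp only [List.foldl_cons, List.map_cons, List.sum_cons, fB]
    by_cases h : (w.toList.length : Int) ≠ (sl.length : Int) - 1
    · rw [if_pos h, if_pos h, ih]
      ring
    · rw [if_neg h, if_neg h, ih]
      ring

-- B's value is the sum of the per-word terms (defeq: the port's lets zeta-reduce to foldB_sum's foldl)
theorem altB (n m : Int) (s : String) (t : List String) :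
    equalization_alt n m s t = (t.map (fB n s.toList)).sum := by
  have h := foldB_sum n s.toList t 0
  rw [zero_add] at h
  exact h

theorem ofList_eq_iff (x : List Char) (w : String) : String.ofList x = w ↔ x = w.toList := by
  constructor
  · intro h; rw [← h, String.toList_ofList]
  · intro h; rw [h, String.ofList_toList]

theorem pvLcp_le_right (x y : List Char) : pvLcp x y ≤ y.length :=
  ((lcp_le_iff x y (pvLcp x y)).mp le_rfl).2.1

theorem fB_nonpos (n : Int) (sl : List Char) (w : String) (hn : n ≤ 0) : fB n sl w = 0 := by
  unfold fB
  split_ifs with h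
  · rfl
  · have hp : (0 : Int) ≤ (pvLcp sl w.toList : Int) := Int.natCast_nonneg _
    omega

-- per-word: the number of deletion positions j < k with s-minus-j = w is B's interval count
theorem perWord (k : Nat) (sl : List Char) (w : String) (hk : k ≤ sl.length) (h1 : 1 ≤ k) :
    (((List.range k).countP (fun j => decide (String.ofList (sl.eraseIdx j) = w))) : Int)
      = fB (k : Int) sl w := by
  by_cases hlen : w.toList.length + 1 = sl.length
  · have hq : pvLcp sl.reverse w.toList.reverse ≤ w.toList.length := by
      have := pvLcp_le_right sl.reverse w.toList.reverse
      simpa using this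
    rw [List.countP_congr (q := fun j =>
        decide (sl.length - 1 - pvLcp sl.reverse w.toList.reverse ≤ j ∧ j ≤ pvLcp sl w.toList))
      (by
        intro j hj
        have hjk : j < k := List.mem_range.mp hj
        have hjL : j < sl.length := lt_of_lt_of_le hjk hk
        simp only [decide_eq_true_eq]
        rw [ofList_eq_iff, erase_eq_iff sl w.toList j hjL hlen]
        omega)]
    rw [countP_range_interval]
    unfold fB
    rw [if_neg (by push_cast; omega)]
    push_cast
    omega
  · rw [List.countP_eq_zero.mpr
      (by
        intro j hj
        have hjk : j < k := List.mem_range.mp hj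
        have hjL : j < sl.length := lt_of_lt_of_le hjk hk
        simp only [decide_eq_true_eq]
        intro heq
        rw [ofList_eq_iff] at heq
        have := congrArg List.length heq
        rw [List.length_eraseIdx_of_lt hjL] at this
        omega)]
    unfold fB
    rw [if_pos (by push_cast; omega)]
    simp

-- ===== VERDICT =====
theorem equalization_spec : Claim_equal_equalization := by
  intro n m s t _ hpre
  unfold Pre_equalization at hpre
  unfold Spec_equalization
  rw [altB n m s t]
  unfold equalization
  simp only []
  rw [foldl_append_singleton, List.nil_append]
  by_cases hn : n ≤ 0
  · rw [PySem.List.pyRange_one_eq_nil hn]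
    simp only [List.foldl_nil]
    symm
    apply List.sum_eq_zero
    intro x hx
    obtain ⟨w, hw, rfl⟩ := List.mem_map.mp hx
    exact fB_nonpos n s.toList w hn
  · push_neg at hn
    obtain ⟨k, hk⟩ : ∃ k : Nat, n = (k : Int) := ⟨n.toNat, by omega⟩
    subst hk
    have hkl : k ≤ s.toList.length := by exact_mod_cast hpre
    have hA := loopA t s.toList k 0 (by omega) 0
    simp only [Nat.cast_zero, zero_add] at hA
    rw [show (0 : Int) = ((0 : Nat) : Int) by simp] at hA
    simp only [Nat.cast_zero] at hA
    rw [hA]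
    rw [sum_count_swap k (fun j => String.ofList (s.toList.eraseIdx j)) t]
    refine congrArg List.sum (List.map_congr_left ?_)
    intro w hw
    exact perWord k s.toList w hkl (by exact_mod_cast hn)
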